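-- pv_equiv track=rewrite | github.com/vutl/Container-Stitching | stit_tts/sources/main_app/top/utils/cor_util.py | final_4cors
-- ===== SOURCE A (Python) =====
-- def find_fourth_point(corners):
--     p1, p2, p3 = corners
--     h_center = (p1[1] + p2[1] + p3[1]) // 3
--
--     if abs(p1[0] - p2[0]) < 10:
--         if p3[1] > h_center:
--             return (p3[0], p3[1] - abs(p1[1] - p2[1]))
--         else:
--             return (p3[0], p3[1] + abs(p1[1] - p2[1]))
--
--     elif abs(p1[0]-p3[0]) < 10:
--         if p2[1] > h_center:
--             return (p2[0], p2[1] - abs(p1[1] - p3[1]))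
--         else:
--             return (p2[0], p2[1] + abs(p1[1] - p3[1]))
--     else:
--         if p1[1] > h_center:
--             return (p1[0], p1[1] - abs(p2[1] - p3[1]))
--         else:
--             return (p1[0], p1[1] + abs(p2[1] - p3[1]))
--
-- def final_4cors(edge_pts, gu_pts, h, w):
--     # Return 4 corners of container that is nearest to edge of image from 3 list points
--     final_cors = []
--     ls_all_pts = edge_pts + gu_pts
--     if len(ls_all_pts) == 3:
--         ls_all_pts.append(find_fourth_point(ls_all_pts))
--
--     ls_top_pts = [cor for cor in ls_all_pts if cor[1] < h//2]
--     ls_bot_pts = [cor for cor in ls_all_pts if cor[1] > h//2]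
--
--     if len(ls_top_pts) == 0 or len(ls_bot_pts) == 0:
--         return []
--
--     point0 = min(ls_top_pts, key=lambda x: x[0])
--     point1 = max(ls_top_pts, key=lambda x: x[0])
--     point2 = max(ls_bot_pts, key=lambda x: x[0])
--     point3 = min(ls_bot_pts, key=lambda x: x[0])
--
--     final_cors.append(point0)
--     final_cors.append(point1)
--     final_cors.append(point2)
--     final_cors.append(point3)
--
--     return final_cors
-- ===== SOURCE B (Python) =====
-- def find_fourth_point(corners):
--     p1, p2, p3 = corners
--     h_center = (p1[1] + p2[1] + p3[1]) // 3
--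
--     if abs(p1[0] - p2[0]) < 10:
--         if p3[1] > h_center:
--             return (p3[0], p3[1] - abs(p1[1] - p2[1]))
--         else:
--             return (p3[0], p3[1] + abs(p1[1] - p2[1]))
--     elif abs(p1[0] - p3[0]) < 10:
--         if p2[1] > h_center:
--             return (p2[0], p2[1] - abs(p1[1] - p3[1]))
--         else:
--             return (p2[0], p2[1] + abs(p1[1] - p3[1]))
--     else:
--         if p1[1] > h_center:
--             return (p1[0], p1[1] - abs(p2[1] - p3[1]))
--         else:
--             return (p1[0], p1[1] + abs(p2[1] - p3[1]))
--
--
-- def final_4cors(edge_pts, gu_pts, h, w):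
--     # One pass over the points with four running extrema instead of two
--     # filtered lists and four min/max scans.
--     ls_all_pts = edge_pts + gu_pts
--     if len(ls_all_pts) == 3:
--         ls_all_pts.append(find_fourth_point(ls_all_pts))
--     half = h // 2
--     top_min = top_max = bot_min = bot_max = None
--     for cor in ls_all_pts:
--         if cor[1] < half:
--             if top_min is None or cor[0] < top_min[0]:
--                 top_min = cor
--             if top_max is None or top_max[0] < cor[0]:
--                 top_max = cor
--         elif cor[1] > half:
--             if bot_min is None or cor[0] < bot_min[0]:
--                 bot_min = cor
--             if bot_max is None or bot_max[0] < cor[0]: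
--                 bot_max = cor
--     if top_min is None or top_max is None or bot_min is None or bot_max is None:
--         return []
--     return [top_min, top_max, bot_max, bot_min]
-- ===== Notes on version B (the rewrite author's own statement) =====
-- stated objective: alternative
-- what changed: Replaces A's two filtered lists plus four separate min/max-with-key scans by a single pass over all points that maintains four running first-extremum (min-x/max-x per half) accumulators.
import Mathlib
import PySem

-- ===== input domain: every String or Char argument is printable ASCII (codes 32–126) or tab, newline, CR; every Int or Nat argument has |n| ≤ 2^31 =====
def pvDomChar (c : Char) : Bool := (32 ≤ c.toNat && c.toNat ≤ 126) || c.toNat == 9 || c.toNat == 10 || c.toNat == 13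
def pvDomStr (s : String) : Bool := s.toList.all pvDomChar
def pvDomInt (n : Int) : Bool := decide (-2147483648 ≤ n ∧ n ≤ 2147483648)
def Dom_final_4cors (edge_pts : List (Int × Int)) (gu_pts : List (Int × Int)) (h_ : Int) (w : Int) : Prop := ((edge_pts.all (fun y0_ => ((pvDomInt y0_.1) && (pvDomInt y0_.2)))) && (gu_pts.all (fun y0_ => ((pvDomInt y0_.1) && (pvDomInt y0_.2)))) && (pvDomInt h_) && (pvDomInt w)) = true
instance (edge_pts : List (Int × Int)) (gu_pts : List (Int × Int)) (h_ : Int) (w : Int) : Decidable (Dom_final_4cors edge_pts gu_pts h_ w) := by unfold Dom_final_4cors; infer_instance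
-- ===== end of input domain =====

-- B replaces A's two filtered lists plus four min/max scans by one loop that
-- maintains four running extrema (objective: alternative single-pass decomposition).

-- ===== PORT A =====
-- Python abs on Int (exact)
def pyabs (x : Int) : Int := if x < 0 then -x else x

-- helper shared by both Pythons, transliterated once
def find_fourth_point (p1 p2 p3 : Int × Int) : Int × Int :=
  let h_center := PySem.Int.floordiv (p1.2 + p2.2 + p3.2) 3
  if pyabs (p1.1 - p2.1) < 10 then
    if p3.2 > h_center then (p3.1, p3.2 - pyabs (p1.2 - p2.2))
    else (p3.1, p3.2 + pyabs (p1.2 - p2.2))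
  else if pyabs (p1.1 - p3.1) < 10 then
    if p2.2 > h_center then (p2.1, p2.2 - pyabs (p1.2 - p3.2))
    else (p2.1, p2.2 + pyabs (p1.2 - p3.2))
  else
    if p1.2 > h_center then (p1.1, p1.2 - pyabs (p2.2 - p3.2))
    else (p1.1, p1.2 + pyabs (p2.2 - p3.2))

def final_4cors (edge_pts : List (Int × Int)) (gu_pts : List (Int × Int)) (h_ : Int) (w : Int) : List (Int × Int) :=
  let ls0 := edge_pts ++ gu_pts
  let ls_all_pts :=
    match ls0 with
    | [p1, p2, p3] => [p1, p2, p3, find_fourth_point p1 p2 p3]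
    | _ => ls0
  let half := PySem.Int.floordiv h_ 2
  let ls_top_pts := ls_all_pts.filter (fun cor => decide (cor.2 < half))
  let ls_bot_pts := ls_all_pts.filter (fun cor => decide (cor.2 > half))
  if ls_top_pts.length = 0 ∨ ls_bot_pts.length = 0 then []
  else
    match PySem.List.min? ls_top_pts (fun x => x.1), PySem.List.max? ls_top_pts (fun x => x.1),
          PySem.List.max? ls_bot_pts (fun x => x.1), PySem.List.min? ls_bot_pts (fun x => x.1) with
    | some p0, some p1, some p2, some p3 => [p0, p1, p2, p3]
    | _, _, _, _ => []   -- unreachable: the lists are nonempty here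

-- ===== PORT B =====
-- B's own copies of the shared Python helpers (identical code, separate names)
def pyabs_alt (x : Int) : Int := if x < 0 then -x else x

def find_fourth_point_alt (p1 p2 p3 : Int × Int) : Int × Int :=
  let h_center := PySem.Int.floordiv (p1.2 + p2.2 + p3.2) 3
  if pyabs_alt (p1.1 - p2.1) < 10 then
    if p3.2 > h_center then (p3.1, p3.2 - pyabs_alt (p1.2 - p2.2))
    else (p3.1, p3.2 + pyabs_alt (p1.2 - p2.2))
  else if pyabs_alt (p1.1 - p3.1) < 10 then
    if p2.2 > h_center then (p2.1, p2.2 - pyabs_alt (p1.2 - p3.2))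
    else (p2.1, p2.2 + pyabs_alt (p1.2 - p3.2))
  else
    if p1.2 > h_center then (p1.1, p1.2 - pyabs_alt (p2.2 - p3.2))
    else (p1.1, p1.2 + pyabs_alt (p2.2 - p3.2))

-- running first-minimum / first-maximum by x-coordinate (strict comparisons)
def fcMinStep (acc : Option (Int × Int)) (cor : Int × Int) : Option (Int × Int) :=
  match acc with
  | none => some cor
  | some m => if cor.1 < m.1 then some cor else some m

def fcMaxStep (acc : Option (Int × Int)) (cor : Int × Int) : Option (Int × Int) :=
  match acc with
  | none => some cor
  | some m => if m.1 < cor.1 then some cor else some m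

def fcAltStep (half : Int)
    (st : Option (Int × Int) × Option (Int × Int) × Option (Int × Int) × Option (Int × Int))
    (cor : Int × Int) :
    Option (Int × Int) × Option (Int × Int) × Option (Int × Int) × Option (Int × Int) :=
  if cor.2 < half then (fcMinStep st.1 cor, fcMaxStep st.2.1 cor, st.2.2.1, st.2.2.2)
  else if cor.2 > half then (st.1, st.2.1, fcMinStep st.2.2.1 cor, fcMaxStep st.2.2.2 cor)
  else st

def fcAltExtend (ls0 : List (Int × Int)) : List (Int × Int) :=
  if ls0.length = 3 then
    -- unpack the three points by position ((0,0) defaults are unreachable here)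
    ls0 ++ [find_fourth_point_alt (ls0.headD (0, 0)) ((ls0.drop 1).headD (0, 0))
              ((ls0.drop 2).headD (0, 0))]
  else ls0

def final_4cors_alt (edge_pts : List (Int × Int)) (gu_pts : List (Int × Int)) (h_ : Int) (w : Int) : List (Int × Int) :=
  let ls0 := edge_pts ++ gu_pts
  let ls_all_pts := fcAltExtend ls0
  let half := PySem.Int.floordiv h_ 2
  let st := ls_all_pts.foldl (fcAltStep half) (none, none, none, none)
  if st.1.isNone ∨ st.2.1.isNone ∨ st.2.2.1.isNone ∨ st.2.2.2.isNone then []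
  else [st.1.getD (0, 0), st.2.1.getD (0, 0), st.2.2.2.getD (0, 0), st.2.2.1.getD (0, 0)]

-- ===== PRECONDITION & SPEC =====
def Spec_final_4cors (edge_pts : List (Int × Int)) (gu_pts : List (Int × Int)) (h_ : Int) (w : Int) (out : List (Int × Int)) : Prop := out = final_4cors_alt edge_pts gu_pts h_ w
instance (edge_pts : List (Int × Int)) (gu_pts : List (Int × Int)) (h_ : Int) (w : Int) (out : List (Int × Int)) : Decidable (Spec_final_4cors edge_pts gu_pts h_ w out) := by unfold Spec_final_4cors; infer_instance

-- ===== CLAIM (what is proved, stated in full; the proofs are below) =====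
def Claim_equal_final_4cors : Prop := ∀ (edge_pts : List (Int × Int)) (gu_pts : List (Int × Int)) (h_ : Int) (w : Int), Dom_final_4cors edge_pts gu_pts h_ w → Spec_final_4cors edge_pts gu_pts h_ w (final_4cors edge_pts gu_pts h_ w)

-- ===== LEMMAS AND PROOFS =====

-- B's single fold computes, componentwise, the four fold states of A's min?/max?
-- over A's two filtered lists.
theorem fcAlt_fold_eq (half : Int) (xs : List (Int × Int))
    (a b c d : Option (Int × Int)) :
    xs.foldl (fcAltStep half) (a, b, c, d) =
      ((xs.filter (fun cor => decide (cor.2 < half))).foldl fcMinStep a,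
       (xs.filter (fun cor => decide (cor.2 < half))).foldl fcMaxStep b,
       (xs.filter (fun cor => decide (cor.2 > half))).foldl fcMinStep c,
       (xs.filter (fun cor => decide (cor.2 > half))).foldl fcMaxStep d) := by
  induction xs generalizing a b c d with
  | nil => rfl
  | cons x t ih =>
    by_cases h1 : x.2 < half
    · have h2 : ¬ x.2 > half := by omega
      simp [List.foldl_cons, h1, h2, fcAltStep, ih]
    · by_cases h2 : x.2 > half
      · simp [List.foldl_cons, h1, h2, fcAltStep, ih]
      · simp [List.foldl_cons, h1, h2, fcAltStep, ih]

theorem fcMin_eq_min? (xs : List (Int × Int)) :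
    xs.foldl fcMinStep none = PySem.List.min? xs (fun x => x.1) := by
  simp only [PySem.List.min?]
  congr 1
  funext acc x
  cases acc <;> simp [fcMinStep]

theorem fcMax_eq_max? (xs : List (Int × Int)) :
    xs.foldl fcMaxStep none = PySem.List.max? xs (fun x => x.1) := by
  simp only [PySem.List.max?]
  congr 1
  funext acc x
  cases acc <;> simp [fcMaxStep]

theorem fc_core (ls : List (Int × Int)) (half : Int) :
    (let top := ls.filter (fun cor => decide (cor.2 < half))
     let bot := ls.filter (fun cor => decide (cor.2 > half))
     if top.length = 0 ∨ bot.length = 0 then ([] : List (Int × Int))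
     else
       match PySem.List.min? top (fun x => x.1), PySem.List.max? top (fun x => x.1),
             PySem.List.max? bot (fun x => x.1), PySem.List.min? bot (fun x => x.1) with
       | some p0, some p1, some p2, some p3 => [p0, p1, p2, p3]
       | _, _, _, _ => []) =
    (let st := ls.foldl (fcAltStep half) (none, none, none, none)
     if st.1.isNone ∨ st.2.1.isNone ∨ st.2.2.1.isNone ∨ st.2.2.2.isNone then ([] : List (Int × Int))
     else [st.1.getD (0, 0), st.2.1.getD (0, 0), st.2.2.2.getD (0, 0), st.2.2.1.getD (0, 0)]) := by
  simp only [fcAlt_fold_eq, fcMin_eq_min?, fcMax_eq_max?]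
  set top := ls.filter (fun cor => decide (cor.2 < half)) with htop
  set bot := ls.filter (fun cor => decide (cor.2 > half)) with hbot
  by_cases ht : top = []
  · simp [ht, PySem.List.min?]
  · by_cases hb : bot = []
    · have hlt : ¬ top.length = 0 := by simpa [List.length_eq_zero_iff] using ht
      simp [hb, PySem.List.min?, PySem.List.max?]
    · have hlt : ¬ top.length = 0 := by simpa [List.length_eq_zero_iff] using ht
      have hlb : ¬ bot.length = 0 := by simpa [List.length_eq_zero_iff] using hb
      obtain ⟨mt, hmt⟩ := Option.ne_none_iff_exists'.mp
        (fun h => ht ((PySem.List.min?_eq_none_iff top (fun x => x.1)).mp h))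
      obtain ⟨xt, hxt⟩ := Option.ne_none_iff_exists'.mp
        (fun h => ht ((PySem.List.max?_eq_none_iff top (fun x => x.1)).mp h))
      obtain ⟨mb, hmb⟩ := Option.ne_none_iff_exists'.mp
        (fun h => hb ((PySem.List.min?_eq_none_iff bot (fun x => x.1)).mp h))
      obtain ⟨xb, hxb⟩ := Option.ne_none_iff_exists'.mp
        (fun h => hb ((PySem.List.max?_eq_none_iff bot (fun x => x.1)).mp h))
      simp only [hlt, hlb, hmt, hxt, hmb, hxb]
      simp

-- ===== VERDICT (by name: the statement is the Claim_ definition above) =====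
theorem fcAltExtend_eq (ls0 : List (Int × Int)) :
    (match ls0 with
     | [p1, p2, p3] => [p1, p2, p3, find_fourth_point p1 p2 p3]
     | _ => ls0) = fcAltExtend ls0 := by
  unfold fcAltExtend
  match ls0 with
  | [] => rfl
  | [_] => rfl
  | [_, _] => rfl
  | [_, _, _] => rfl
  | _ :: _ :: _ :: _ :: t => simp [List.length_cons]

theorem final_4cors_spec : Claim_equal_final_4cors := by
  intro edge_pts gu_pts h_ w _
  unfold Spec_final_4cors final_4cors final_4cors_alt
  simp only [fcAltExtend_eq]
  exact fc_core _ _
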